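-- pv_equiv track=rewrite | github.com/atrawog/oauth-https-proxy | scripts/sort_justfile.py | group_commands
-- ===== SOURCE A (Python) =====
-- from typing import List, Tuple
--
-- def group_commands(commands: List[Tuple[str, str]]) -> dict:
--     """Group commands by category."""
--     groups = {
--         'Certificate Management': [],
--         'Configuration Management': [],
--         'Docker Service Management': [],
--         'External Service Management': [],
--         'Logging and Monitoring': [],
--         'OAuth Management': [],
--         'Port Management': [],
--         'Protected Resource Management': [],
--         'Proxy Management': [],
--         'Route Management': [],
--         'System Management': [],
--         'Testing': [],
--         'Token Management': [],
--         'Utility': [],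
--     }
--
--     for name, content in commands:
--         if name.startswith('cert-'):
--             groups['Certificate Management'].append((name, content))
--         elif name.startswith('config-'):
--             groups['Configuration Management'].append((name, content))
--         elif name.startswith('service-port'):
--             groups['Port Management'].append((name, content))
--         elif name.startswith('service-') and not any(x in name for x in ['list-external', 'show-external', 'register', 'unregister', 'update-external']):
--             groups['Docker Service Management'].append((name, content))
--         elif name.startswith('service-') and any(x in name for x in ['list-external', 'show-external', 'register', 'unregister', 'update-external', 'register-oauth', 'list-all']):
--             groups['External Service Management'].append((name, content))
--         elif name.startswith('logs-'):
--             groups['Logging and Monitoring'].append((name, content))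
--         elif name.startswith('logs'):
--             groups['Logging and Monitoring'].append((name, content))
--         elif name.startswith('oauth-'):
--             groups['OAuth Management'].append((name, content))
--         elif name.startswith('proxy-resource'):
--             groups['Protected Resource Management'].append((name, content))
--         elif name.startswith('proxy-'):
--             groups['Proxy Management'].append((name, content))
--         elif name.startswith('route-'):
--             groups['Route Management'].append((name, content))
--         elif name.startswith('token-'):
--             groups['Token Management'].append((name, content))
--         elif name.startswith('test'):
--             groups['Testing'].append((name, content))
--         elif name in ['up', 'down', 'restart', 'rebuild', 'shell', 'redis-cli', 'health', 'help']:
--             groups['System Management'].append((name, content))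
--         else:
--             groups['Utility'].append((name, content))
--
--     # Sort commands within each group
--     for group in groups:
--         groups[group].sort(key=lambda x: x[0])
--
--     return groups
-- ===== SOURCE B (Python) =====
-- from typing import List, Tuple
--
-- CATEGORIES = [
--     'Certificate Management', 'Configuration Management', 'Docker Service Management',
--     'External Service Management', 'Logging and Monitoring', 'OAuth Management',
--     'Port Management', 'Protected Resource Management', 'Proxy Management',
--     'Route Management', 'System Management', 'Testing', 'Token Management', 'Utility',
-- ]
--
-- def _classify(name: str) -> str:
--     if name.startswith('cert-'):
--         return 'Certificate Management'
--     if name.startswith('config-'):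
--         return 'Configuration Management'
--     if name.startswith('service-port'):
--         return 'Port Management'
--     if name.startswith('service-') and not any(x in name for x in ['list-external', 'show-external', 'register', 'unregister', 'update-external']):
--         return 'Docker Service Management'
--     if name.startswith('service-') and any(x in name for x in ['list-external', 'show-external', 'register', 'unregister', 'update-external', 'register-oauth', 'list-all']):
--         return 'External Service Management'
--     if name.startswith('logs-'):
--         return 'Logging and Monitoring'
--     if name.startswith('logs'):
--         return 'Logging and Monitoring'
--     if name.startswith('oauth-'):
--         return 'OAuth Management'
--     if name.startswith('proxy-resource'):
--         return 'Protected Resource Management'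
--     if name.startswith('proxy-'):
--         return 'Proxy Management'
--     if name.startswith('route-'):
--         return 'Route Management'
--     if name.startswith('token-'):
--         return 'Token Management'
--     if name.startswith('test'):
--         return 'Testing'
--     if name in ['up', 'down', 'restart', 'rebuild', 'shell', 'redis-cli', 'health', 'help']:
--         return 'System Management'
--     return 'Utility'
--
-- def group_commands(commands: List[Tuple[str, str]]) -> dict:
--     """Group commands by category: one global stable sort, then one classifying pass."""
--     ordered = sorted(commands, key=lambda x: x[0])
--     return {cat: [c for c in ordered if _classify(c[0]) == cat] for cat in CATEGORIES}
-- ===== Notes on version B (the rewrite author's own statement) =====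
-- stated objective: alternative
-- what changed: B sorts the whole command list once by name (stable) and then builds each category as a single classifying filter over the pre-sorted list, instead of A's bucket-appending dict pass followed by 14 separate per-bucket sorts.
import Mathlib
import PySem

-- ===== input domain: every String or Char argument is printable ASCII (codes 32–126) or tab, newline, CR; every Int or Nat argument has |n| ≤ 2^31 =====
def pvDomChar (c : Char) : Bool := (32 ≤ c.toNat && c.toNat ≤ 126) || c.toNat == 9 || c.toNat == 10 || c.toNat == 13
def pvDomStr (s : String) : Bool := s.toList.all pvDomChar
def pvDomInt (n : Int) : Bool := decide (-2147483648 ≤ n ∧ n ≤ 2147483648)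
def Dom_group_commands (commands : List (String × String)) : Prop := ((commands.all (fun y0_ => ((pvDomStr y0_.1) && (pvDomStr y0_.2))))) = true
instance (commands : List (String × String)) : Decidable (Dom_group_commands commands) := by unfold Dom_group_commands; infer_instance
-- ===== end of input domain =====

-- B replaces A's 14 per-bucket sorts by ONE global stable sort followed by a per-category
-- classifying filter (no dict mutation); equivalence holds on all inputs.

-- ===== PORT A =====
def pvGroups0 : PySem.Dict String (List (String × String)) :=
  (((((((((((((((PySem.Dict.empty.insert "Certificate Management" ([] : List (String × String))).insert
    "Configuration Management" []).insert "Docker Service Management" []).insert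
    "External Service Management" []).insert "Logging and Monitoring" []).insert
    "OAuth Management" []).insert "Port Management" []).insert
    "Protected Resource Management" []).insert "Proxy Management" []).insert
    "Route Management" []).insert "System Management" []).insert
    "Testing" []).insert "Token Management" []).insert "Utility" []))

def group_commands (commands : List (String × String)) : List (String × List (String × String)) :=
  let groups := commands.foldl (fun d c =>
    let name := c.1
    let content := c.2
    if PySem.Str.startswith name "cert-" then d.modify "Certificate Management" [] (· ++ [(name, content)])
    else if PySem.Str.startswith name "config-" then d.modify "Configuration Management" [] (· ++ [(name, content)])
    else if PySem.Str.startswith name "service-port" then d.modify "Port Management" [] (· ++ [(name, content)])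
    else if PySem.Str.startswith name "service-" && !(["list-external", "show-external", "register", "unregister", "update-external"].any (fun x => PySem.Str.isIn x name)) then d.modify "Docker Service Management" [] (· ++ [(name, content)])
    else if PySem.Str.startswith name "service-" && (["list-external", "show-external", "register", "unregister", "update-external", "register-oauth", "list-all"].any (fun x => PySem.Str.isIn x name)) then d.modify "External Service Management" [] (· ++ [(name, content)])
    else if PySem.Str.startswith name "logs-" then d.modify "Logging and Monitoring" [] (· ++ [(name, content)])
    else if PySem.Str.startswith name "logs" then d.modify "Logging and Monitoring" [] (· ++ [(name, content)])
    else if PySem.Str.startswith name "oauth-" then d.modify "OAuth Management" [] (· ++ [(name, content)])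
    else if PySem.Str.startswith name "proxy-resource" then d.modify "Protected Resource Management" [] (· ++ [(name, content)])
    else if PySem.Str.startswith name "proxy-" then d.modify "Proxy Management" [] (· ++ [(name, content)])
    else if PySem.Str.startswith name "route-" then d.modify "Route Management" [] (· ++ [(name, content)])
    else if PySem.Str.startswith name "token-" then d.modify "Token Management" [] (· ++ [(name, content)])
    else if PySem.Str.startswith name "test" then d.modify "Testing" [] (· ++ [(name, content)])
    else if ["up", "down", "restart", "rebuild", "shell", "redis-cli", "health", "help"].contains name then d.modify "System Management" [] (· ++ [(name, content)])
    else d.modify "Utility" [] (· ++ [(name, content)])) pvGroups0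
  let final := groups.keys.foldl (fun d g => d.modify g [] (fun l => PySem.List.sorted l (fun x => x.1))) groups
  final.items

-- ===== PORT B =====
def pvCategories : List String :=
  ["Certificate Management", "Configuration Management", "Docker Service Management",
   "External Service Management", "Logging and Monitoring", "OAuth Management",
   "Port Management", "Protected Resource Management", "Proxy Management",
   "Route Management", "System Management", "Testing", "Token Management", "Utility"]

def pvClassify (name : String) : String :=
  if PySem.Str.startswith name "cert-" then "Certificate Management"
  else if PySem.Str.startswith name "config-" then "Configuration Management"
  else if PySem.Str.startswith name "service-port" then "Port Management"
  else if PySem.Str.startswith name "service-" && !(["list-external", "show-external", "register", "unregister", "update-external"].any (fun x => PySem.Str.isIn x name)) then "Docker Service Management"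
  else if PySem.Str.startswith name "service-" && (["list-external", "show-external", "register", "unregister", "update-external", "register-oauth", "list-all"].any (fun x => PySem.Str.isIn x name)) then "External Service Management"
  else if PySem.Str.startswith name "logs-" then "Logging and Monitoring"
  else if PySem.Str.startswith name "logs" then "Logging and Monitoring"
  else if PySem.Str.startswith name "oauth-" then "OAuth Management"
  else if PySem.Str.startswith name "proxy-resource" then "Protected Resource Management"
  else if PySem.Str.startswith name "proxy-" then "Proxy Management"
  else if PySem.Str.startswith name "route-" then "Route Management"
  else if PySem.Str.startswith name "token-" then "Token Management"
  else if PySem.Str.startswith name "test" then "Testing"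
  else if ["up", "down", "restart", "rebuild", "shell", "redis-cli", "health", "help"].contains name then "System Management"
  else "Utility"

def group_commands_alt (commands : List (String × String)) : List (String × List (String × String)) :=
  let ordered := PySem.List.sorted commands (fun x => x.1)
  pvCategories.map (fun cat => (cat, ordered.filter (fun c => pvClassify c.1 == cat)))

-- ===== PRECONDITION & SPEC =====
def Spec_group_commands (commands : List (String × String)) (out : List (String × List (String × String))) : Prop := out = group_commands_alt commands
instance (commands : List (String × String)) (out : List (String × List (String × String))) : Decidable (Spec_group_commands commands out) := by unfold Spec_group_commands; infer_instance

-- ===== CLAIM (what is proved, stated in full; the proofs are below) =====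
def Claim_equal_group_commands : Prop := ∀ (commands : List (String × String)), Dom_group_commands commands → Spec_group_commands commands (group_commands commands)

-- ===== LEMMAS AND PROOFS =====

-- A's loop body is "append c to the bucket named by pvClassify c.1".
theorem pv_body_eq (d : PySem.Dict String (List (String × String))) (c : String × String) :
    (if PySem.Str.startswith c.1 "cert-" then d.modify "Certificate Management" [] (· ++ [(c.1, c.2)])
     else if PySem.Str.startswith c.1 "config-" then d.modify "Configuration Management" [] (· ++ [(c.1, c.2)])
     else if PySem.Str.startswith c.1 "service-port" then d.modify "Port Management" [] (· ++ [(c.1, c.2)])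
     else if PySem.Str.startswith c.1 "service-" && !(["list-external", "show-external", "register", "unregister", "update-external"].any (fun x => PySem.Str.isIn x c.1)) then d.modify "Docker Service Management" [] (· ++ [(c.1, c.2)])
     else if PySem.Str.startswith c.1 "service-" && (["list-external", "show-external", "register", "unregister", "update-external", "register-oauth", "list-all"].any (fun x => PySem.Str.isIn x c.1)) then d.modify "External Service Management" [] (· ++ [(c.1, c.2)])
     else if PySem.Str.startswith c.1 "logs-" then d.modify "Logging and Monitoring" [] (· ++ [(c.1, c.2)])
     else if PySem.Str.startswith c.1 "logs" then d.modify "Logging and Monitoring" [] (· ++ [(c.1, c.2)])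
     else if PySem.Str.startswith c.1 "oauth-" then d.modify "OAuth Management" [] (· ++ [(c.1, c.2)])
     else if PySem.Str.startswith c.1 "proxy-resource" then d.modify "Protected Resource Management" [] (· ++ [(c.1, c.2)])
     else if PySem.Str.startswith c.1 "proxy-" then d.modify "Proxy Management" [] (· ++ [(c.1, c.2)])
     else if PySem.Str.startswith c.1 "route-" then d.modify "Route Management" [] (· ++ [(c.1, c.2)])
     else if PySem.Str.startswith c.1 "token-" then d.modify "Token Management" [] (· ++ [(c.1, c.2)])
     else if PySem.Str.startswith c.1 "test" then d.modify "Testing" [] (· ++ [(c.1, c.2)])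
     else if ["up", "down", "restart", "rebuild", "shell", "redis-cli", "health", "help"].contains c.1 then d.modify "System Management" [] (· ++ [(c.1, c.2)])
     else d.modify "Utility" [] (· ++ [(c.1, c.2)]))
    = d.modify (pvClassify c.1) [] (· ++ [c]) := by
  cases c with
  | mk name content =>
    unfold pvClassify
    simp only [apply_ite (fun k : String => d.modify k [] (fun l => l ++ [(name, content)]))]

theorem pv_ite_mem {P : Prop} [Decidable P] {a b : String} (ha : a ∈ pvCategories)
    (hb : b ∈ pvCategories) : (if P then a else b) ∈ pvCategories := by
  by_cases h : P
  · rwa [if_pos h]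
  · rwa [if_neg h]

theorem pv_classify_mem (name : String) : pvClassify name ∈ pvCategories := by
  unfold pvClassify
  exact pv_ite_mem (by decide) (pv_ite_mem (by decide) (pv_ite_mem (by decide) (pv_ite_mem (by decide) (pv_ite_mem (by decide) (pv_ite_mem (by decide) (pv_ite_mem (by decide) (pv_ite_mem (by decide) (pv_ite_mem (by decide) (pv_ite_mem (by decide) (pv_ite_mem (by decide) (pv_ite_mem (by decide) (pv_ite_mem (by decide) (pv_ite_mem (by decide) (by decide))))))))))))))

theorem pv_ite_nil {P : Prop} [Decidable P] {a b : List (String × String)} (ha : a = [])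
    (hb : b = []) : (if P then a else b) = [] := by
  by_cases h : P
  · rwa [if_pos h]
  · rwa [if_neg h]

set_option maxHeartbeats 1000000 in
theorem pv_keys0 : pvGroups0.keys = pvCategories := rfl

theorem pv_nodup_categories : pvCategories.Nodup := by decide

theorem pv_getD0 (k : String) : pvGroups0.getD k [] = [] := by
  simp only [pvGroups0, PySem.Dict.getD_insert, PySem.Dict.getD_empty]
  exact pv_ite_nil rfl (pv_ite_nil rfl (pv_ite_nil rfl (pv_ite_nil rfl (pv_ite_nil rfl (pv_ite_nil rfl (pv_ite_nil rfl (pv_ite_nil rfl (pv_ite_nil rfl (pv_ite_nil rfl (pv_ite_nil rfl (pv_ite_nil rfl (pv_ite_nil rfl (pv_ite_nil rfl rfl)))))))))))))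

theorem pv_update_self (s : PySem.Set String) (xs : List String) (h : ∀ x ∈ xs, x ∈ s) :
    PySem.Set.update s xs = s := by
  rw [PySem.Set.update_eq_append_filter]
  have hnil : (PySem.Set.ofList xs).filter (fun y => !PySem.Set.contains s y) = [] := by
    rw [List.filter_eq_nil_iff]
    intro y hy
    have hmem : y ∈ xs := (PySem.Set.mem_ofList xs y).mp hy
    simp
    exact h y hmem
  rw [hnil, List.append_nil]

theorem pv_keysA (commands : List (String × String)) :
    (commands.foldl (fun d c => d.modify (pvClassify c.1) [] (· ++ [c])) pvGroups0).keys = pvCategories := by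
  have h : (commands.foldl (fun d c => d.modify (pvClassify c.1) [] (· ++ [c])) pvGroups0).keys
      = PySem.Set.update pvGroups0.keys (commands.map (fun c => pvClassify c.1)) :=
    PySem.Dict.keys_foldl_modify_key commands (fun c => pvClassify c.1) [] (fun _ c v => v ++ [c]) pvGroups0
  rw [h, pv_keys0]
  apply pv_update_self
  intro x hx
  obtain ⟨c, _, rfl⟩ := List.mem_map.mp hx
  exact pv_classify_mem c.1

theorem pv_getDA (commands : List (String × String)) (k : String) :
    (commands.foldl (fun d c => d.modify (pvClassify c.1) [] (· ++ [c])) pvGroups0).getD k []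
      = commands.filter (fun c => pvClassify c.1 == k) := by
  have h2 : commands.foldl (fun d c => d.modify (pvClassify c.1) [] (· ++ [c])) pvGroups0
      = (commands.map (fun c => (pvClassify c.1, c))).foldl (fun d p => d.modify p.1 [] (· ++ [p.2])) pvGroups0 :=
    by simp [List.foldl_map]
  rw [h2, PySem.Dict.getD_foldl_modify_append, pv_getD0, List.nil_append, List.filter_map, List.map_map]
  simp [Function.comp_def]

-- one modify pass over a Nodup key list, read back per key
theorem pv_getD_foldl_modify (ks : List String) (f : List (String × String) → List (String × String))
    (d : PySem.Dict String (List (String × String))) (hnd : ks.Nodup) (k : String) :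
    (ks.foldl (fun d' g => d'.modify g [] f) d).getD k []
      = if k ∈ ks then f (d.getD k []) else d.getD k [] := by
  induction ks generalizing d with
  | nil => simp
  | cons g gs ih =>
    rw [List.nodup_cons] at hnd
    rw [List.foldl_cons, ih _ hnd.2]
    by_cases hkg : k = g
    · subst hkg
      rw [if_neg hnd.1, if_pos (List.mem_cons_self), PySem.Dict.getD_modify_self]
    · rw [PySem.Dict.getD_modify_of_ne d [] f hkg]
      by_cases hk : k ∈ gs
      · rw [if_pos hk, if_pos (List.mem_cons.mpr (Or.inr hk))]
      · rw [if_neg hk, if_neg (fun hm => (List.mem_cons.mp hm).elim hkg hk)]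

theorem pv_sortloop (d : PySem.Dict String (List (String × String)))
    (f : List (String × String) → List (String × String)) (hnd : d.keys.Nodup) :
    (d.keys.foldl (fun d' g => d'.modify g [] f) d).items
      = d.keys.map (fun k => (k, f (d.getD k []))) := by
  have hkeys : (d.keys.foldl (fun d' g => d'.modify g [] f) d).keys
      = PySem.Set.update d.keys (d.keys.map id) :=
    PySem.Dict.keys_foldl_modify_key d.keys id [] (fun _ _ => f) d
  rw [List.map_id, pv_update_self d.keys d.keys (fun x hx => hx)] at hkeys
  have hnd' : (d.keys.foldl (fun d' g => d'.modify g [] f) d).keys.Nodup := by rw [hkeys]; exact hnd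
  rw [PySem.Dict.items_eq_map_keys _ hnd' [], hkeys]
  apply List.map_congr_left
  intro k hk
  rw [pv_getD_foldl_modify d.keys f d hnd k, if_pos hk]

theorem pv_groupA_eq (commands : List (String × String)) :
    group_commands commands
      = pvCategories.map (fun k => (k, PySem.List.sorted (commands.filter (fun c => pvClassify c.1 == k)) (fun x => x.1))) := by
  simp only [group_commands, pv_body_eq]
  rw [pv_sortloop _ _ (by rw [pv_keysA]; exact pv_nodup_categories)]
  rw [pv_keysA]
  apply List.map_congr_left
  intro k _
  rw [pv_getDA]

-- ===== stable sort commutes with filter =====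

theorem pv_pairwise_insertBy (x : String × String) (acc : List (String × String))
    (h : acc.Pairwise (fun a b => a.1 ≤ b.1)) :
    (PySem.List.insertBy (fun a b => decide ((a : String × String).1 < b.1)) x acc).Pairwise (fun a b => a.1 ≤ b.1) := by
  induction acc with
  | nil => simp [PySem.List.insertBy]
  | cons y ys ih =>
    rw [List.pairwise_cons] at h
    by_cases hxy : x.1 < y.1
    · have he : PySem.List.insertBy (fun a b => decide ((a : String × String).1 < b.1)) x (y :: ys) = x :: y :: ys := by
        simp [PySem.List.insertBy, hxy]
      rw [he, List.pairwise_cons]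
      refine ⟨?_, List.pairwise_cons.mpr h⟩
      intro z hz
      rcases List.mem_cons.mp hz with hz | hz
      · exact hz ▸ le_of_lt hxy
      · exact le_trans (le_of_lt hxy) (h.1 z hz)
    · have he : PySem.List.insertBy (fun a b => decide ((a : String × String).1 < b.1)) x (y :: ys)
          = y :: PySem.List.insertBy (fun a b => decide ((a : String × String).1 < b.1)) x ys := by
        simp [PySem.List.insertBy, hxy]
      rw [he, List.pairwise_cons]
      refine ⟨?_, ih h.2⟩
      intro z hz
      rcases (PySem.List.mem_insertBy _ _ _ _).mp hz with hz | hz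
      · exact hz ▸ le_of_not_gt hxy
      · exact h.1 z hz

theorem pv_insertBy_nil (x : String × String) :
    PySem.List.insertBy (fun a b => decide ((a : String × String).1 < b.1)) x [] = [x] := by
  simp [PySem.List.insertBy]

theorem pv_insertBy_pos (x y : String × String) (ys : List (String × String)) (h : x.1 < y.1) :
    PySem.List.insertBy (fun a b => decide ((a : String × String).1 < b.1)) x (y :: ys) = x :: y :: ys := by
  simp [PySem.List.insertBy, h]

theorem pv_insertBy_neg (x y : String × String) (ys : List (String × String)) (h : ¬ x.1 < y.1) :
    PySem.List.insertBy (fun a b => decide ((a : String × String).1 < b.1)) x (y :: ys)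
      = y :: PySem.List.insertBy (fun a b => decide ((a : String × String).1 < b.1)) x ys := by
  simp [PySem.List.insertBy, h]

theorem pv_filter_insertBy (p : String × String → Bool) (x : String × String) (acc : List (String × String))
    (h : acc.Pairwise (fun a b => a.1 ≤ b.1)) :
    (PySem.List.insertBy (fun a b => decide ((a : String × String).1 < b.1)) x acc).filter p
      = if p x then PySem.List.insertBy (fun a b => decide ((a : String × String).1 < b.1)) x (acc.filter p)
        else acc.filter p := by
  induction acc with
  | nil =>
    rw [pv_insertBy_nil]
    by_cases hp : p x
    · rw [if_pos hp, List.filter_nil, pv_insertBy_nil, List.filter_cons_of_pos hp, List.filter_nil]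
    · rw [if_neg hp, List.filter_nil, List.filter_cons_of_neg (by simpa using hp), List.filter_nil]
  | cons y ys ih =>
    rw [List.pairwise_cons] at h
    by_cases hxy : x.1 < y.1
    · rw [pv_insertBy_pos x y ys hxy]
      by_cases hp : p x
      · rw [if_pos hp, List.filter_cons_of_pos hp]
        by_cases hpy : p y
        · rw [List.filter_cons_of_pos hpy, pv_insertBy_pos x y _ hxy]
        · rw [List.filter_cons_of_neg (by simpa using hpy)]
          cases hys : ys.filter p with
          | nil => rw [pv_insertBy_nil]
          | cons z zs =>
            have hz : z ∈ ys := List.mem_of_mem_filter (by rw [hys]; exact List.mem_cons_self)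
            have hxz : x.1 < z.1 := lt_of_lt_of_le hxy (h.1 z hz)
            rw [pv_insertBy_pos x z zs hxz]
      · rw [if_neg hp, List.filter_cons_of_neg (by simpa using hp)]
    · rw [pv_insertBy_neg x y ys hxy]
      by_cases hpy : p y
      · rw [List.filter_cons_of_pos hpy, ih h.2]
        by_cases hp : p x
        · rw [if_pos hp, List.filter_cons_of_pos hpy, pv_insertBy_neg x y _ hxy, if_pos hp]
        · rw [if_neg hp, List.filter_cons_of_pos hpy, if_neg hp]
      · rw [List.filter_cons_of_neg (by simpa using hpy), ih h.2,
          List.filter_cons_of_neg (by simpa using hpy)]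

theorem pv_filter_foldl_insertBy (p : String × String → Bool) (xs acc : List (String × String))
    (h : acc.Pairwise (fun a b => a.1 ≤ b.1)) :
    (xs.foldl (fun a x => PySem.List.insertBy (fun a b => decide ((a : String × String).1 < b.1)) x a) acc).filter p
      = (xs.filter p).foldl (fun a x => PySem.List.insertBy (fun a b => decide ((a : String × String).1 < b.1)) x a) (acc.filter p) := by
  induction xs generalizing acc with
  | nil => simp
  | cons x xs ih =>
    rw [List.foldl_cons, List.filter_cons]
    rw [ih _ (pv_pairwise_insertBy x acc h), pv_filter_insertBy p x acc h]
    by_cases hp : p x <;> simp [hp]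

theorem pv_sorted_filter (p : String × String → Bool) (xs : List (String × String)) :
    (PySem.List.sorted xs (fun x => x.1)).filter p
      = PySem.List.sorted (xs.filter p) (fun x => x.1) := by
  rw [PySem.List.sorted_eq_foldl_insertBy xs (fun x => x.1),
    PySem.List.sorted_eq_foldl_insertBy (xs.filter p) (fun x => x.1)]
  exact pv_filter_foldl_insertBy p xs [] (by simp)

theorem pv_groupB_eq (commands : List (String × String)) :
    group_commands_alt commands
      = pvCategories.map (fun k => (k, PySem.List.sorted (commands.filter (fun c => pvClassify c.1 == k)) (fun x => x.1))) := by
  simp only [group_commands_alt]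
  apply List.map_congr_left
  intro k _
  rw [pv_sorted_filter]

-- ===== VERDICT (by name: the statement is the Claim_ definition above) =====
theorem group_commands_spec : Claim_equal_group_commands := by
  intro commands _
  show group_commands commands = group_commands_alt commands
  rw [pv_groupA_eq, pv_groupB_eq]
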